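-- pv_equiv track=rewrite | github.com/MrBrantCode/unitest_baseline | mut_generate/mist_train_cf/cf_44667/solution.py | shared_elements
-- ===== SOURCE A (Python) =====
-- def shared_elements(list1: list, list2: list):
--     """
--     This function takes two lists of integers as input and returns a sorted list of unique elements that are present in both input lists.
--
--     Args:
--         list1 (list): The first list of integers.
--         list2 (list): The second list of integers.
--
--     Returns:
--         list: A sorted list of unique elements that are present in both input lists.
--     """
--
--     # Convert the lists to sets to remove duplicates and sort them
--     list1 = sorted(set(list1))
--     list2 = sorted(set(list2))
--
--     # Initialize an empty list to store the shared elements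
--     result = []
--
--     # Initialize pointers for both lists
--     i, j = 0, 0
--
--     # Iterate over the lists
--     while i < len(list1) and j < len(list2):
--         # If the current elements in both lists are equal, add it to the result and move both pointers
--         if list1[i] == list2[j]:
--             result.append(list1[i])
--             i += 1
--             j += 1
--         # If the current element in list1 is smaller, move the pointer for list1
--         elif list1[i] < list2[j]:
--             i += 1
--         # If the current element in list2 is smaller, move the pointer for list2
--         else:
--             j += 1
--
--     # Return the list of shared elements
--     return result
-- ===== SOURCE B (Python) =====
-- def shared_elements(list1: list, list2: list):
--     return sorted(set(list1) & set(list2))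
-- ===== Notes on version B (the rewrite author's own statement) =====
-- stated objective: simpler
-- what changed: B intersects the two hash sets with '&' and sorts the result once, removing A's pre-sorting of both lists and the two-pointer merge loop entirely.
import Mathlib
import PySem

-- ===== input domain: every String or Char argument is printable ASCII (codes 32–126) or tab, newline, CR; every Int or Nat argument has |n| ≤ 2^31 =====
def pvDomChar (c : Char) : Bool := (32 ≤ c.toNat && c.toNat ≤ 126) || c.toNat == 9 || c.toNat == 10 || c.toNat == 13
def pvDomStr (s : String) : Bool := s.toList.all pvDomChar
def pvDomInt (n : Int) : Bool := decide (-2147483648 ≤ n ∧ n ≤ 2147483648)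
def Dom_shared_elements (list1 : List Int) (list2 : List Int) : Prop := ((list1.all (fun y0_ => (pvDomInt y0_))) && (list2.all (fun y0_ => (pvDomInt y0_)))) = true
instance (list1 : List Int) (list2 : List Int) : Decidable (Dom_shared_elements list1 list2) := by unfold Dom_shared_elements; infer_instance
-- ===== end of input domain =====

-- B replaces A's sort-both-then-two-pointer-merge with a single hash-set intersection
-- followed by one sort: simpler, no parallel scan.

-- ===== PORT A =====
-- the while loop of A, as recursion over the two sorted deduplicated lists
-- (i/j pointers become the heads of the remaining suffixes; result built front-to-back)
def mergeCommon : List Int → List Int → List Int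
  | x :: xs, y :: ys =>
    if x = y then x :: mergeCommon xs ys
    else if x < y then mergeCommon xs (y :: ys)
    else mergeCommon (x :: xs) ys
  | _, _ => []
termination_by xs ys => xs.length + ys.length

def shared_elements (list1 : List Int) (list2 : List Int) : List Int :=
  let l1 := PySem.List.sorted (PySem.Set.ofList list1) (fun x => x)
  let l2 := PySem.List.sorted (PySem.Set.ofList list2) (fun x => x)
  mergeCommon l1 l2

-- ===== PORT B =====
def shared_elements_alt (list1 : List Int) (list2 : List Int) : List Int :=
  PySem.List.sorted (PySem.Set.inter (PySem.Set.ofList list1) (PySem.Set.ofList list2)) (fun x => x)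

-- ===== PRECONDITION & SPEC =====
def Spec_shared_elements (list1 : List Int) (list2 : List Int) (out : List Int) : Prop := out = shared_elements_alt list1 list2
instance (list1 : List Int) (list2 : List Int) (out : List Int) : Decidable (Spec_shared_elements list1 list2 out) := by unfold Spec_shared_elements; infer_instance

-- ===== CLAIM (what is proved, stated in full; the proofs are below) =====
def Claim_equal_shared_elements : Prop := ∀ (list1 : List Int) (list2 : List Int), Dom_shared_elements list1 list2 → Spec_shared_elements list1 list2 (shared_elements list1 list2)

-- ===== LEMMAS AND PROOFS =====

-- on strictly increasing lists, the two-pointer merge keeps exactly the elements of the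
-- first list that occur in the second
theorem mergeCommon_eq_filter : ∀ (xs ys : List Int),
    xs.Pairwise (· < ·) → ys.Pairwise (· < ·) →
    mergeCommon xs ys = xs.filter (fun x => ys.contains x)
  | [], ys, _, _ => by simp [mergeCommon]
  | x :: xs, [], _, _ => by simp [mergeCommon]
  | x :: xs, y :: ys, hx, hy => by
    rw [List.pairwise_cons] at hx hy
    by_cases hxy : x = y
    · subst hxy
      rw [mergeCommon, if_pos rfl,
        mergeCommon_eq_filter xs ys hx.2 hy.2]
      simp only [List.filter_cons]
      have hx_in : (x :: ys).contains x = true := by simp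
      rw [hx_in]
      congr 1
      apply List.filter_congr
      intro z hz
      have : x < z := hx.1 z hz
      simp only [List.contains_cons]
      have : (z == x) = false := by simp; omega
      rw [this]; simp
    · by_cases hlt : x < y
      · rw [mergeCommon, if_neg hxy, if_pos hlt,
          mergeCommon_eq_filter xs (y :: ys) hx.2 (List.pairwise_cons.mpr hy)]
        simp only [List.filter_cons]
        have : ((y :: ys).contains x) = false := by
          simp only [List.contains_cons, Bool.or_eq_false_iff]
          constructor
          · simp; omega
          · simp only [List.contains_eq_mem, decide_eq_false_iff_not]
            intro hmem
            have := hy.1 x hmem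
            omega
        rw [this]; simp
      · have hgt : y < x := by omega
        rw [mergeCommon, if_neg hxy, if_neg hlt,
          mergeCommon_eq_filter (x :: xs) ys (List.pairwise_cons.mpr hx) hy.2]
        apply List.filter_congr
        intro z hz
        have hz' : x ≤ z := by
          rcases List.mem_cons.mp hz with h | h
          · omega
          · have := hx.1 z h; omega
        simp only [List.contains_cons]
        have : (z == y) = false := by simp; omega
        rw [this]; simp
termination_by xs ys => xs.length + ys.length

-- ===== VERDICT (by name: the statement is the Claim_ definition above) =====
theorem shared_elements_spec : Claim_equal_shared_elements := by
  intro list1 list2 _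
  unfold Spec_shared_elements shared_elements shared_elements_alt
  set s1 := PySem.List.sorted (PySem.Set.ofList list1) (fun x => x) with hs1
  set s2 := PySem.List.sorted (PySem.Set.ofList list2) (fun x => x) with hs2
  have h1 : s1.Pairwise (· < ·) := PySem.List.sorted_ofList_pairwise_lt _
  have h2 : s2.Pairwise (· < ·) := PySem.List.sorted_ofList_pairwise_lt _
  rw [mergeCommon_eq_filter s1 s2 h1 h2]
  symm
  apply PySem.List.sorted_eq_of_perm_of_pairwise_lt
  · -- the filtered sorted list is a permutation of the set intersection
    have hp : s1.Perm (PySem.Set.ofList list1) := PySem.List.sorted_perm _ _ _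
    have : (s1.filter (fun x => s2.contains x)).Perm
        ((PySem.Set.ofList list1).filter (fun x => s2.contains x)) := hp.filter _
    refine this.trans ?_
    show ((PySem.Set.ofList list1).filter _).Perm ((PySem.Set.ofList list1).filter _)
    rw [List.filter_congr]
    intro z _
    simp [List.contains_eq_mem, hs2, PySem.List.mem_sorted]
  · exact h1.filter _
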